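-- pv_equiv track=rewrite | github.com/noveoko/skillTests | WordSoup/app.py | checkForMatch
-- ===== SOURCE A (Python) =====
-- def checkForMatch(text_input, soup_bowl):
--     input_chars = {a:text_input.count(a) for a in text_input}
--     soup_chars = {a:0 for a in text_input}
--     char_keys = input_chars.keys()
--     while input_chars != soup_chars:
--         for char in soup_bowl:
--                 if char in char_keys:
--                     soup_chars[char]+=1
--         if input_chars == soup_chars:
--             return True
--         else:
--             return False
-- ===== SOURCE B (Python) =====
-- def checkForMatch(text_input, soup_bowl):
--     if not text_input:
--         return None
--     chars = set(text_input)
--     return sorted(c for c in soup_bowl if c in chars) == sorted(text_input)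
-- ===== Notes on version B (the rewrite author's own statement) =====
-- stated objective: faster
-- what changed: Replaces the dict-of-counts construction (with a quadratic repeated str.count pass) and order-insensitive dict comparison by an empty-input guard plus sort-and-compare of the soup filtered to the text's character set against the text itself.
import Mathlib
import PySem

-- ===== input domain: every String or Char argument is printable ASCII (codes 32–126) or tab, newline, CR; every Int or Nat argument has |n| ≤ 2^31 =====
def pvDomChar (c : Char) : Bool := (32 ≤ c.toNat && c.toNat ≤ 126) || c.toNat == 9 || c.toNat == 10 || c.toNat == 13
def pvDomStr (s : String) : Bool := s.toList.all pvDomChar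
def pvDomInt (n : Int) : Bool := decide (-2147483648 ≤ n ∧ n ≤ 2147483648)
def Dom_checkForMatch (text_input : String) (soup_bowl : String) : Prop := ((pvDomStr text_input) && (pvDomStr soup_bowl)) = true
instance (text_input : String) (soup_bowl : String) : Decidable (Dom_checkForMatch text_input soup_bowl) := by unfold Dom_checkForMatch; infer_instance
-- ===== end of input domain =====

-- B replaces A's count-dict construction and order-insensitive dict comparison by an
-- empty-input guard plus sort-and-compare of the filtered soup against the text (idiomatic rewrite).


-- ===== PORT A =====
-- Python's '==' on dicts ignores insertion order: same key set, same value at each key.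
def pyDictEq (d e : PySem.Dict Char Int) : Bool :=
  PySem.Set.equal d.keys e.keys && d.keys.all (fun k => d.get? k == e.get? k)

def checkForMatch (text_input : String) (soup_bowl : String) : Option Bool :=
  let tl := text_input.toList
  let input_chars : PySem.Dict Char Int :=
    tl.foldl (fun d a => d.insert a ((PySem.Chars.count tl [a] : Int))) PySem.Dict.empty
  let soup_chars : PySem.Dict Char Int :=
    tl.foldl (fun d a => d.insert a 0) PySem.Dict.empty
  let char_keys := input_chars.keys
  if pyDictEq input_chars soup_chars then
    none            -- while-condition false at entry: the loop body never runs, Python returns None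
  else
    -- the loop body always returns during its first iteration
    let soup_chars := soup_bowl.toList.foldl
      (fun d char => if char ∈ char_keys then d.modify char 0 (· + 1) else d) soup_chars
    some (pyDictEq input_chars soup_chars)

-- ===== PORT B =====
def checkForMatch_alt (text_input : String) (soup_bowl : String) : Option Bool :=
  if text_input.toList = [] then none
  else
    let chars := PySem.Set.ofList text_input.toList
    some ((PySem.List.sorted (soup_bowl.toList.filter (fun c => PySem.Set.contains chars c)) (fun x => x) false)
          == PySem.List.sorted text_input.toList (fun x => x) false)

-- ===== PRECONDITION & SPEC =====
def Spec_checkForMatch (text_input : String) (soup_bowl : String) (out : Option Bool) : Prop := out = checkForMatch_alt text_input soup_bowl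
instance (text_input : String) (soup_bowl : String) (out : Option Bool) : Decidable (Spec_checkForMatch text_input soup_bowl out) := by unfold Spec_checkForMatch; infer_instance

-- ===== CLAIM (what is proved, stated in full; the proofs are below) =====
def Claim_equal_checkForMatch : Prop := ∀ (text_input : String) (soup_bowl : String), Dom_checkForMatch text_input soup_bowl → Spec_checkForMatch text_input soup_bowl (checkForMatch text_input soup_bowl)

-- ===== LEMMAS AND PROOFS =====

-- proof-side names for A's two initial dicts
def pvIC (tl : List Char) : PySem.Dict Char Int :=
  tl.foldl (fun d a => d.insert a ((PySem.Chars.count tl [a] : Int))) PySem.Dict.empty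
def pvZC (tl : List Char) : PySem.Dict Char Int :=
  tl.foldl (fun d a => d.insert a 0) PySem.Dict.empty

-- counting the single-character substring [a] is counting the character a
theorem count_go_singleton (a : Char) (l : List Char) (fuel acc : Nat) (h : l.length ≤ fuel) :
    PySem.Chars.count.go [a] fuel l acc = acc + l.count a := by
  induction l generalizing fuel acc with
  | nil => rw [PySem.Chars.count.go.eq_def]; cases fuel <;> simp
  | cons x t ih =>
    cases fuel with
    | zero => simp at h
    | succ n =>
      have hpre : (([a] : List Char).isPrefixOf (x :: t)) = (a == x) := by
        simp [List.isPrefixOf]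
      rw [PySem.Chars.count.go.eq_def]
      simp only [hpre]
      by_cases hx : a = x
      · subst hx
        simp only [BEq.rfl, if_true, List.length_cons, List.length_nil, Nat.zero_add,
          List.drop_succ_cons, List.drop_zero]
        rw [ih n (acc + 1) (by simpa using h)]
        simp
        omega
      · have hbe : (a == x) = false := by simp [hx]
        simp only [hbe, if_false, Bool.false_eq_true]
        rw [ih n acc (by simpa using h)]
        simp [List.count_cons]
        exact fun hxa => hx hxa.symm

theorem chars_count_singleton (cs : List Char) (a : Char) :
    PySem.Chars.count cs [a] = cs.count a := by
  unfold PySem.Chars.count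
  rw [if_neg (by simp)]
  simpa using count_go_singleton a cs cs.length 0 le_rfl

-- lookup in a keyed-insert fold where the stored value depends only on the key
theorem get?_foldl_insert_keyfun (f : Char → Int) (l : List Char) (d : PySem.Dict Char Int) (k : Char) :
    (l.foldl (fun d a => d.insert a (f a)) d).get? k
      = if k ∈ l then some (f k) else d.get? k := by
  induction l generalizing d with
  | nil => simp
  | cons a t ih =>
    simp only [List.foldl_cons, ih, List.mem_cons]
    by_cases hk : k ∈ t
    · simp [hk]
    · by_cases hka : k = a
      · subst hka; simp [hk, PySem.Dict.get?_insert_self]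
      · simp [hk, hka, PySem.Dict.get?_insert_of_ne d (f a) hka]

theorem keys_foldl_insert_keyfun (f : Char → Int) (l : List Char) :
    (l.foldl (fun d a => d.insert a (f a)) PySem.Dict.empty).keys = PySem.Set.ofList l := by
  rw [PySem.Dict.keys_foldl_insert l (fun _ a => f a) PySem.Dict.empty]
  simp [PySem.Set.update_nil_left]

-- updating a set with elements it already has changes nothing
theorem set_update_of_forall_mem (s : PySem.Set Char) (l : List Char) (h : ∀ x ∈ l, x ∈ s) :
    PySem.Set.update s l = s := by
  rw [PySem.Set.update_eq_append_filter]
  have hfil : (PySem.Set.ofList l).filter (fun y => !(PySem.Set.contains s y)) = [] := by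
    apply List.filter_eq_nil_iff.mpr
    intro y hy
    have hys : y ∈ s := h y ((PySem.Set.mem_ofList l y).mp hy)
    simpa using hys
  rw [hfil, List.append_nil]

theorem getI (tl : List Char) (k : Char) :
    (pvIC tl).get? k = if k ∈ tl then some ((tl.count k : Int)) else none := by
  unfold pvIC
  rw [get?_foldl_insert_keyfun (fun a => (PySem.Chars.count tl [a] : Int))]
  simp [chars_count_singleton]

theorem getZ (tl : List Char) (k : Char) :
    (pvZC tl).get? k = if k ∈ tl then some 0 else none := by
  unfold pvZC
  rw [get?_foldl_insert_keyfun (fun _ => (0 : Int))]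
  simp

theorem keysIC (tl : List Char) : (pvIC tl).keys = PySem.Set.ofList tl :=
  keys_foldl_insert_keyfun _ tl
theorem keysZC (tl : List Char) : (pvZC tl).keys = PySem.Set.ofList tl :=
  keys_foldl_insert_keyfun _ tl

-- the two initial dicts differ as Python dicts when the text is nonempty
theorem pyDictEq_init_false (tl : List Char) (h : tl ≠ []) : pyDictEq (pvIC tl) (pvZC tl) = false := by
  obtain ⟨a, rest, hcons⟩ : ∃ a r, tl = a :: r := by
    cases htl' : tl with
    | nil => exact absurd htl' h
    | cons a r => exact ⟨a, r, rfl⟩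
  have ha : a ∈ tl := by rw [hcons]; exact List.mem_cons_self
  cases hb : pyDictEq (pvIC tl) (pvZC tl)
  · rfl
  · exfalso
    unfold pyDictEq at hb
    have hall := (List.all_eq_true.mp (Bool.and_elim_right hb)) a
      (by rw [keysIC]; exact (PySem.Set.mem_ofList tl a).mpr ha)
    rw [getI, getZ, if_pos ha, if_pos ha] at hall
    have hzero : (tl.count a : Int) = 0 := by simpa using hall
    have hpos : 0 < tl.count a := List.count_pos_iff.mpr ha
    omega

-- the whole nonempty case, over the underlying character lists
theorem core_eq (tl S : List Char) :
    pyDictEq (pvIC tl)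
        (S.foldl (fun d char => if char ∈ (pvIC tl).keys then d.modify char 0 (· + 1) else d) (pvZC tl))
      = ((PySem.List.sorted (S.filter (fun c => PySem.Set.contains (PySem.Set.ofList tl) c)) (fun x => x) false)
          == PySem.List.sorted tl (fun x => x) false) := by
  -- rewrite the guarded loop as a fold over the filtered soup
  rw [PySem.List.foldl_ite_eq_foldl_filter (fun c => c ∈ (pvIC tl).keys)
      (fun d char => d.modify char 0 (· + 1)) S (pvZC tl)]
  set Sf : List Char := S.filter (fun c => decide (c ∈ (pvIC tl).keys)) with hSf
  set F : PySem.Dict Char Int := Sf.foldl (fun d char => d.modify char 0 (· + 1)) (pvZC tl) with hF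
  have hSfmem : ∀ c ∈ Sf, c ∈ tl := by
    intro c hc
    have := List.of_mem_filter hc
    rw [keysIC] at this
    exact (PySem.Set.mem_ofList tl c).mp (by simpa using this)
  have keysF : F.keys = PySem.Set.ofList tl := by
    rw [hF, PySem.Dict.keys_foldl_modify Sf 0 (fun _ _ v => v + 1) (pvZC tl), keysZC]
    exact set_update_of_forall_mem _ _ (fun x hx => (PySem.Set.mem_ofList tl x).mpr (hSfmem x hx))
  have getDF : ∀ k, F.getD k 0 = (Sf.count k : Int) := by
    intro k
    rw [hF, PySem.Dict.getD_foldl_modify_add_one]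
    rw [PySem.Dict.getD_eq_get?_getD, getZ]
    by_cases hk : k ∈ tl <;> simp [hk]
  have getF : ∀ k ∈ tl, F.get? k = some ((Sf.count k : Int)) := by
    intro k hk
    have hmem : k ∈ F.keys := by rw [keysF]; exact (PySem.Set.mem_ofList tl k).mpr hk
    cases hv : F.get? k with
    | none => exact absurd hmem ((PySem.Dict.get?_eq_none_iff_not_mem_keys F k).mp hv)
    | some v =>
      have := PySem.Dict.getD_of_get?_eq_some F (0 : Int) hv
      rw [getDF k] at this
      rw [← this]
  -- A's comparison says: every character of the text occurs equally often in text and filtered soup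
  have hA : pyDictEq (pvIC tl) F = true ↔ ∀ k ∈ tl, tl.count k = Sf.count k := by
    unfold pyDictEq
    rw [Bool.and_eq_true, List.all_eq_true]
    constructor
    · rintro ⟨-, hall⟩ k hk
      have := hall k (by rw [keysIC]; exact (PySem.Set.mem_ofList tl k).mpr hk)
      rw [getI, if_pos hk, getF k hk] at this
      have hc : (tl.count k : Int) = (Sf.count k : Int) := by simpa using this
      exact_mod_cast hc
    · intro hcnt
      refine ⟨(PySem.Set.equal_iff _ _).mpr (by rw [keysIC, keysF]; intro x; rfl), ?_⟩
      intro k hk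
      rw [keysIC] at hk
      have hk' : k ∈ tl := (PySem.Set.mem_ofList tl k).mp hk
      rw [getI, if_pos hk', getF k hk']
      simp [hcnt k hk']
  -- B's filter is A's filter
  have hfiltereq : S.filter (fun c => PySem.Set.contains (PySem.Set.ofList tl) c) = Sf := by
    rw [hSf]
    apply List.filter_congr
    intro c _
    rw [keysIC]
    cases hc : PySem.Set.contains (PySem.Set.ofList tl) c
    · have hnm : c ∉ PySem.Set.ofList tl := fun hmem => by
        rw [(PySem.Set.contains_iff _ _).mpr hmem] at hc; cases hc
      simp [hnm]
    · have hm : c ∈ PySem.Set.ofList tl := (PySem.Set.contains_iff _ _).mp hc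
      simp [hm]
  -- B's comparison says the same thing
  have hB : ((PySem.List.sorted Sf (fun x => x) false) == PySem.List.sorted tl (fun x => x) false) = true
      ↔ ∀ k ∈ tl, tl.count k = Sf.count k := by
    rw [beq_iff_eq, PySem.List.sorted_id_eq_sorted_id_iff_perm, List.perm_iff_count]
    constructor
    · intro hp k _
      exact (hp k).symm
    · intro hcnt c
      by_cases hc : c ∈ tl
      · exact (hcnt c hc).symm
      · have h1 : tl.count c = 0 := List.count_eq_zero.mpr hc
        have h2 : Sf.count c = 0 := List.count_eq_zero.mpr (fun hmem => hc (hSfmem c hmem))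
        rw [h1, h2]
  rw [hfiltereq]
  cases hb : pyDictEq (pvIC tl) F
  · cases hb2 : ((PySem.List.sorted Sf (fun x => x) false) == PySem.List.sorted tl (fun x => x) false)
    · rfl
    · exact absurd (hA.mpr (hB.mp hb2)) (by simp [hb])
  · exact (hB.mpr (hA.mp hb)).symm

-- ===== VERDICT (by name: the statement is the Claim_ definition above) =====
theorem checkForMatch_spec : Claim_equal_checkForMatch := by
  intro text_input soup_bowl _
  unfold Spec_checkForMatch
  by_cases h : text_input.toList = []
  · show checkForMatch text_input soup_bowl = checkForMatch_alt text_input soup_bowl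
    unfold checkForMatch checkForMatch_alt
    simp [h, pyDictEq]
  · have hA0 : checkForMatch text_input soup_bowl
        = (if pyDictEq (pvIC text_input.toList) (pvZC text_input.toList) then none
           else some (pyDictEq (pvIC text_input.toList)
             (soup_bowl.toList.foldl
               (fun d char => if char ∈ (pvIC text_input.toList).keys then d.modify char 0 (· + 1) else d)
               (pvZC text_input.toList)))) := rfl
    have hB0 : checkForMatch_alt text_input soup_bowl
        = some ((PySem.List.sorted
              (soup_bowl.toList.filter (fun c => PySem.Set.contains (PySem.Set.ofList text_input.toList) c))
              (fun x => x) false)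
            == PySem.List.sorted text_input.toList (fun x => x) false) := by
      unfold checkForMatch_alt
      rw [if_neg h]
    rw [hA0, hB0, if_neg (by rw [pyDictEq_init_false text_input.toList h]; simp),
      core_eq text_input.toList soup_bowl.toList]
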